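-- pv_equiv track=rewrite | github.com/karishmatank/ls-core | py-110/py119_practice/problem_3.py | capitalize_every_second
-- ===== SOURCE A (Python) =====
-- def capitalize_every_second(word):
--     capitalized = []
--     for idx, char in enumerate(word):
--         if idx % 2 == 1:
--             capitalized.append(char.upper())
--         else:
--             capitalized.append(char)
--     return ''.join(capitalized)
-- ===== SOURCE B (Python) =====
-- def capitalize_every_second(word):
--     parts = []
--     for i in range(0, len(word), 2):
--         parts.append(word[i])
--         if i + 1 < len(word):
--             parts.append(word[i + 1].upper())
--     return ''.join(parts)
-- ===== Notes on version B (the rewrite author's own statement) =====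
-- stated objective: alternative
-- what changed: B iterates pairwise over indices 0,2,4,... emitting each even-index char unchanged and its odd partner uppercased (bounds-guarded), instead of enumerating every character and testing index parity.
import Mathlib
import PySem

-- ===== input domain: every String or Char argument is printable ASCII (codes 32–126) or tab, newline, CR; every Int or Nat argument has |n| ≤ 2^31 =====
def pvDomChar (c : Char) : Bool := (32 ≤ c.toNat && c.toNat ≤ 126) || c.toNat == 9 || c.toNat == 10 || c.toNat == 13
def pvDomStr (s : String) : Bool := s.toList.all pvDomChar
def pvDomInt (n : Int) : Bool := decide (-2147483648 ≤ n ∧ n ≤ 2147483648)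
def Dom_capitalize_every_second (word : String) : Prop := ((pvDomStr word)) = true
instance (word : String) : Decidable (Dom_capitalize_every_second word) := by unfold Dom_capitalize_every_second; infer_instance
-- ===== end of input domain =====

-- B iterates pairwise (even char, then its uppercased odd partner) instead of testing index parity per character; alternative decomposition, same cost.


-- ===== PORT A =====
-- for idx, char in enumerate(word): append char.upper() if idx odd else char; ''.join
def capitalize_every_second (word : String) : String :=
  let capitalized : List Char :=
    (PySem.List.enumerate word.toList 0).foldl
      (fun acc p => if p.1 % 2 == 1 then acc ++ [PySem.Chars.upperChar p.2] else acc ++ [p.2]) []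
  String.mk capitalized

-- ===== PORT B =====
-- pairwise step: emit word[i], then word[i+1].upper() if in bounds (i = 0,2,4,...)
def capitalize_every_second_altGo : List Char → List Char
  | [] => []
  | [c] => [c]
  | c :: d :: rest => c :: PySem.Chars.upperChar d :: capitalize_every_second_altGo rest

def capitalize_every_second_alt (word : String) : String :=
  String.mk (capitalize_every_second_altGo word.toList)

-- ===== PRECONDITION & SPEC =====
def Spec_capitalize_every_second (word : String) (out : String) : Prop := out = capitalize_every_second_alt word
instance (word : String) (out : String) : Decidable (Spec_capitalize_every_second word out) := by unfold Spec_capitalize_every_second; infer_instance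

-- ===== CLAIM (what is proved, stated in full; the proofs are below) =====
def Claim_equal_capitalize_every_second : Prop := ∀ (word : String), Dom_capitalize_every_second word → Spec_capitalize_every_second word (capitalize_every_second word)

-- ===== LEMMAS AND PROOFS =====

-- A's loop, characterised: processing xs starting at index s
def pvGoA (s : Int) : List Char → List Char
  | [] => []
  | c :: cs => (if s % 2 == 1 then PySem.Chars.upperChar c else c) :: pvGoA (s + 1) cs

lemma foldl_enum_eq_goA (xs : List Char) : ∀ (s : Int) (acc : List Char),
    (PySem.List.enumerate xs s).foldl
      (fun acc p => if p.1 % 2 == 1 then acc ++ [PySem.Chars.upperChar p.2] else acc ++ [p.2]) acc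
      = acc ++ pvGoA s xs := by
  induction xs with
  | nil => intro s acc; simp [PySem.List.enumerate_nil, pvGoA]
  | cons c cs ih =>
    intro s acc
    rw [PySem.List.enumerate_cons]
    simp only [List.foldl_cons, ih]
    by_cases h : s % 2 == 1 <;> simp [pvGoA, h]

lemma goA_even : ∀ (xs : List Char) (s : Int), s % 2 = 0 →
    pvGoA s xs = capitalize_every_second_altGo xs
  | [], _, _ => rfl
  | [c], s, h => by
      simp [pvGoA, capitalize_every_second_altGo]
      omega
  | c :: d :: rest, s, h => by
      have h1 : ¬ (s % 2 == 1) = true := by simp; omega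
      have h2 : ((s + 1) % 2 == 1) = true := by simp; omega
      simp only [pvGoA, capitalize_every_second_altGo, h2, if_true,
        goA_even rest (s + 1 + 1) (by omega)]
      rw [if_neg h1]

-- ===== VERDICT (by name: the statement is the Claim_ definition above) =====
theorem capitalize_every_second_spec : Claim_equal_capitalize_every_second := by
  intro word _
  unfold Spec_capitalize_every_second capitalize_every_second capitalize_every_second_alt
  rw [foldl_enum_eq_goA, goA_even word.toList 0 rfl]
  rfl
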